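-- pv_equiv track=rewrite | github.com/kimjaebeom98/Algorithms | 프로그래머스/lv1/92334. 신고 결과 받기/신고 결과 받기.py | solution
-- ===== SOURCE A (Python) =====
-- def solution(id_list, report, k):
--     report_cnt = {}
--     chk = {}
--     # 자기를 신고한사람
--     tmp = {}
--     res = {}
--     for i in id_list:
--         report_cnt[i] = 0
--         chk[i] = set()
--         tmp[i] = []
--         res[i] = 0
--
--     for re in report:
--         # 신고자 신고당한자
--         a, b = re.split(' ')
--         length = len(chk[a])
--         # a가 b를 신고함
--         chk[a].add(b)
--         # 같은 사람을 신고 했을 때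
--         if length == len(chk[a]):
--             continue
--         else:
--             report_cnt[b] += 1
--             tmp[b].append(a)
--
--
--     for key in report_cnt:
--         # 자신이 신고를 k번이상 당하면 정지 -> 신고한 사람들에게 메일 보냄
--         if report_cnt[key] >= k:
--             # 정지먹은 녀석을 신고한 사람들
--             for a in tmp[key] :
--                 res[a] += 1
--
--     result = []
--     for i in id_list:
--         result.append(res[i])
--
--     return result
-- ===== SOURCE B (Python) =====
-- def solution(id_list, report, k):
--     pairs = {tuple(r.split(' ')) for r in report}
--     banned = {u for u in id_list if sum(b == u for _, b in pairs) >= k}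
--     return [sum(a == i and b in banned for a, b in pairs) for i in id_list]
-- ===== Notes on version B (the rewrite author's own statement) =====
-- stated objective: simpler
-- what changed: Replaces A's four dicts and three aggregation loops (per-reporter dedup sets, a count dict, a reverse map tmp cross-referenced into res) by a dict-free brute force: dedup the report pairs once, form the banned set by directly counting each id's reports with a scan over the pairs, and build each result entry by scanning the pair set for that reporter.
import Mathlib
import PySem

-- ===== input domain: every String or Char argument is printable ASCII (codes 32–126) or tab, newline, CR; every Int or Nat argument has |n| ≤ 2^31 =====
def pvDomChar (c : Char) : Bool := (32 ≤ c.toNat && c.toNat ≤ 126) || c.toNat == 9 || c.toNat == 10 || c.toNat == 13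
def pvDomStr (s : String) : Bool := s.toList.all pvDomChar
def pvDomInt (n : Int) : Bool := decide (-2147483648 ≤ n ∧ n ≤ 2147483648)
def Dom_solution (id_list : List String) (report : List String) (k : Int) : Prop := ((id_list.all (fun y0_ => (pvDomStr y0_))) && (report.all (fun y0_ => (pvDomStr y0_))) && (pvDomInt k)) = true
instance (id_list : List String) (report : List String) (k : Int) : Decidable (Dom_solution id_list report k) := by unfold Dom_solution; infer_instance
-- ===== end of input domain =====

-- B replaces A's four dicts and three aggregation loops by a dict-free brute force: dedup the pairs
-- once, scan-count per id to form the banned set, and scan-count per reporter to build the result.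

-- ===== PORT A =====
-- first loop of A: initialize the four dicts over id_list
def aInitStep (st : PySem.Dict String Int × PySem.Dict String (PySem.Set String) × PySem.Dict String (List String) × PySem.Dict String Int) (i : String) : PySem.Dict String Int × PySem.Dict String (PySem.Set String) × PySem.Dict String (List String) × PySem.Dict String Int :=
  (st.1.insert i 0, st.2.1.insert i PySem.Set.empty, st.2.2.1.insert i [], st.2.2.2.insert i 0)

-- body of A's report loop; state = (report_cnt, chk, tmp). 'a, b = re.split(' ')' raises unless the
-- split has exactly two parts (excluded by Pre_); dict lookups are ported as getD/modify, exact under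
-- Pre_ which guarantees the keys are present (Python raises KeyError otherwise).
def aReportStep (st : PySem.Dict String Int × PySem.Dict String (PySem.Set String) × PySem.Dict String (List String)) (re : String) : PySem.Dict String Int × PySem.Dict String (PySem.Set String) × PySem.Dict String (List String) :=
  match PySem.Str.split? re " " with
  | some [a, b] =>
    let s := st.2.1.getD a PySem.Set.empty
    let length := PySem.Set.len s
    let s' := PySem.Set.add s b
    let chk' := st.2.1.insert a s'
    if length == PySem.Set.len s' then (st.1, chk', st.2.2)
    else (st.1.modify b 0 (· + 1), chk', st.2.2.modify b [] (· ++ [a]))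
  | _ => st

-- body of A's mailing loop over report_cnt's keys
def aMailStep (report_cnt : PySem.Dict String Int) (tmp : PySem.Dict String (List String)) (k : Int) (res : PySem.Dict String Int) (key : String) : PySem.Dict String Int :=
  if k ≤ report_cnt.getD key 0 then
    (tmp.getD key []).foldl (fun res a => res.modify a 0 (· + 1)) res
  else res

def solution (id_list : List String) (report : List String) (k : Int) : List Int :=
  let init := id_list.foldl aInitStep (PySem.Dict.empty, PySem.Dict.empty, PySem.Dict.empty, PySem.Dict.empty)
  let st := report.foldl aReportStep (init.1, init.2.1, init.2.2.1)
  let res := st.1.keys.foldl (aMailStep st.1 st.2.2 k) init.2.2.2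
  id_list.foldl (fun result i => result ++ [res.getD i 0]) []

-- ===== PORT B =====
-- tuple(r.split(' ')); under Pre_ the split always has exactly two parts (otherwise Python's
-- 'for _, b in pairs' unpack raises, excluded by Pre_)
def parsePair (r : String) : String × String :=
  match PySem.Str.split? r " " with
  | some [a, b] => (a, b)
  | _ => ("", "")

-- B: pairs = set of report pairs; banned = {u in id_list | count of reports against u >= k}
-- (the two sums over the set are order-independent counts, so iterating the Set is exact)
def solution_alt (id_list : List String) (report : List String) (k : Int) : List Int :=
  let pairs : PySem.Set (String × String) := PySem.Set.ofList (report.map parsePair)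
  let banned : PySem.Set String :=
    PySem.Set.ofList (id_list.filter (fun u => decide (k ≤ (pairs.countP (fun p => p.2 == u) : Int))))
  id_list.map (fun i => ((pairs.countP (fun p => p.1 == i && banned.contains p.2)) : Int))

-- ===== PRECONDITION & SPEC =====
-- a report is good iff it splits on ' ' into exactly two parts, both present in id_list:
-- otherwise Python A raises (ValueError on the unpack, or KeyError on chk[a] / report_cnt[b])
def goodReport (id_list : List String) (r : String) : Bool :=
  match PySem.Str.split? r " " with
  | some [a, b] => id_list.contains a && id_list.contains b
  | _ => false

-- exactly the inputs on which the Python A returns normally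
def Pre_solution (id_list : List String) (report : List String) (k : Int) : Prop :=
  ∀ r ∈ report, goodReport id_list r = true
instance (id_list : List String) (report : List String) (k : Int) : Decidable (Pre_solution id_list report k) := by unfold Pre_solution; infer_instance

def pvWitness_solution : List String × List String × Int := (["muzi", "frodo"], ["muzi frodo", "frodo muzi"], 1)

def Spec_solution (id_list : List String) (report : List String) (k : Int) (out : List Int) : Prop := out = solution_alt id_list report k
instance (id_list : List String) (report : List String) (k : Int) (out : List Int) : Decidable (Spec_solution id_list report k out) := by unfold Spec_solution; infer_instance

-- ===== CLAIM (what is proved, stated in full; the proofs are below) =====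
def Claim_equal_solution : Prop := ∀ (id_list : List String) (report : List String) (k : Int), Dom_solution id_list report k → Pre_solution id_list report k → Spec_solution id_list report k (solution id_list report k)

-- ===== LEMMAS AND PROOFS =====

-- getD of a dict built by inserting the same constant everywhere is that constant
theorem getD_foldl_insert_const {ν : Type} (l : List String) (c : ν) (d : PySem.Dict String ν)
    (h : ∀ x, d.getD x c = c) (x : String) :
    (l.foldl (fun d i => d.insert i c) d).getD x c = c := by
  induction l generalizing d with
  | nil => exact h x
  | cons i l ih =>
    simp only [List.foldl_cons]
    refine ih _ (fun y => ?_)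
    rw [PySem.Dict.getD_insert]
    split_ifs with h1
    · rfl
    · exact h y

-- first-occurrence sieve: the elements of l not already in s, in order, deduplicated
def sieve {α : Type} [BEq α] (s : PySem.Set α) : List α → List α
  | [] => []
  | p :: l => if s.contains p then sieve s l else p :: sieve (s.add p) l

theorem foldl_add_eq_sieve {α : Type} [BEq α] [LawfulBEq α] (l : List α) (s : PySem.Set α) :
    l.foldl PySem.Set.add s = s ++ sieve s l := by
  induction l generalizing s with
  | nil => simp [sieve]
  | cons p l ih =>
    simp only [List.foldl_cons, sieve]
    by_cases hp : p ∈ s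
    · rw [PySem.Set.add_of_mem hp, if_pos (by simpa [PySem.Set.contains, List.contains_eq_mem] using hp)]
      exact ih s
    · rw [if_neg (by simpa [PySem.Set.contains, List.contains_eq_mem] using hp)]
      rw [PySem.Set.add_of_not_mem hp, ih (s ++ [p])]
      simp

theorem mem_sieve {α : Type} [BEq α] (s : PySem.Set α) (l : List α) (x : α)
    (hx : x ∈ sieve s l) : x ∈ l := by
  induction l generalizing s with
  | nil => simpa [sieve] using hx
  | cons p l ih =>
    simp only [sieve] at hx
    split_ifs at hx with hp
    · exact List.mem_cons_of_mem _ (ih _ hx)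
    · rcases List.mem_cons.mp hx with h | h
      · exact h ▸ List.mem_cons_self
      · exact List.mem_cons_of_mem _ (ih _ h)

theorem len_beq_len_add (s : PySem.Set String) (b : String) :
    (PySem.Set.len s == PySem.Set.len (s.add b)) = s.contains b := by
  by_cases hb : b ∈ s
  · rw [PySem.Set.add_of_mem hb]
    simp [PySem.Set.contains, List.contains_eq_mem, hb]
  · rw [PySem.Set.add_of_not_mem hb]
    simp only [PySem.Set.len, PySem.Set.contains, List.contains_eq_mem, hb,
      List.length_append, List.length_cons, List.length_nil]
    rw [show (decide False) = false from rfl, beq_eq_false_iff_ne]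
    intro hcast
    omega

-- A's report loop, run on good reports from a chk dict representing the pair set S, computes the same
-- report_cnt and tmp as the plain pair loops over the sieved (first-occurrence) parsed pairs
theorem afold (rs : List String)
    (hg : ∀ r ∈ rs, ∃ a b, PySem.Str.split? r " " = some [a, b])
    (S : PySem.Set (String × String)) (cnt : PySem.Dict String Int)
    (chk : PySem.Dict String (PySem.Set String)) (tmp : PySem.Dict String (List String))
    (hinv : ∀ a b, b ∈ chk.getD a PySem.Set.empty ↔ (a, b) ∈ S) :
    (rs.foldl aReportStep (cnt, chk, tmp)).1
      = (sieve S (rs.map parsePair)).foldl (fun d p => d.modify p.2 0 (· + 1)) cnt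
    ∧ (rs.foldl aReportStep (cnt, chk, tmp)).2.2
      = (sieve S (rs.map parsePair)).foldl (fun d p => d.modify p.2 [] (· ++ [p.1])) tmp := by
  induction rs generalizing S cnt chk tmp with
  | nil => simp [sieve]
  | cons r rs ih =>
    obtain ⟨a, b, hab⟩ := hg r (by simp)
    have hg' : ∀ r' ∈ rs, ∃ a b, PySem.Str.split? r' " " = some [a, b] :=
      fun r' hr' => hg r' (by simp [hr'])
    simp only [List.foldl_cons, List.map_cons]
    rw [show parsePair r = (a, b) from by simp [parsePair, hab]]
    rw [show aReportStep (cnt, chk, tmp) r =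
        (if (chk.getD a PySem.Set.empty).contains b then
          (cnt, chk.insert a ((chk.getD a PySem.Set.empty).add b), tmp)
        else
          (cnt.modify b 0 (· + 1), chk.insert a ((chk.getD a PySem.Set.empty).add b),
            tmp.modify b [] (· ++ [a]))) from by
      simp only [aReportStep, hab]
      rw [len_beq_len_add]]
    simp only [sieve]
    rw [show S.contains (a, b) = (chk.getD a PySem.Set.empty).contains b from by
      simp only [PySem.Set.contains, List.contains_eq_mem]
      rw [decide_eq_decide]
      exact (hinv a b).symm]
    by_cases hb : b ∈ chk.getD a PySem.Set.empty
    · rw [if_pos (by simpa [PySem.Set.contains, List.contains_eq_mem] using hb),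
          if_pos (by simpa [PySem.Set.contains, List.contains_eq_mem] using hb)]
      rw [PySem.Set.add_of_mem hb]
      refine ih hg' S cnt (chk.insert a (chk.getD a PySem.Set.empty)) tmp (fun x y => ?_)
      rw [PySem.Dict.getD_insert]
      split_ifs with hx
      · subst hx; exact hinv x y
      · exact hinv x y
    · rw [if_neg (by simpa [PySem.Set.contains, List.contains_eq_mem] using hb),
          if_neg (by simpa [PySem.Set.contains, List.contains_eq_mem] using hb)]
      simp only [List.foldl_cons]
      refine ih hg' (S.add (a, b)) _ _ _ (fun x y => ?_)
      rw [PySem.Dict.getD_insert]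
      rw [PySem.Set.mem_add]
      split_ifs with hx
      · subst hx
        rw [PySem.Set.mem_add]
        constructor
        · rintro (hy | hy)
          · exact Or.inl ((hinv x y).mp hy)
          · exact Or.inr (by rw [hy])
        · rintro (hy | hy)
          · exact Or.inl ((hinv x y).mpr hy)
          · injection hy with h1 h2
            exact Or.inr h2
      · constructor
        · intro hy; exact Or.inl ((hinv x y).mp hy)
        · rintro (hy | hy)
          · exact (hinv x y).mpr hy
          · exact absurd hy (by intro h; injection h with h1 h2; exact hx h1)

-- A's init loop componentwise
theorem foldl_aInitStep (l : List String) (d1 : PySem.Dict String Int)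
    (d2 : PySem.Dict String (PySem.Set String)) (d3 : PySem.Dict String (List String)) (d4 : PySem.Dict String Int) :
    l.foldl aInitStep (d1, d2, d3, d4)
      = (l.foldl (fun d i => d.insert i (0 : Int)) d1,
         l.foldl (fun d i => d.insert i PySem.Set.empty) d2,
         l.foldl (fun d i => d.insert i ([] : List String)) d3,
         l.foldl (fun d i => d.insert i (0 : Int)) d4) := by
  induction l generalizing d1 d2 d3 d4 with
  | nil => rfl
  | cons i l ih =>
    simp only [List.foldl_cons, aInitStep]
    exact ih _ _ _ _

-- A's mailing loop, read back at one id
theorem mail_getD (K : List String) (rc : PySem.Dict String Int) (tmp : PySem.Dict String (List String))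
    (k : Int) (res : PySem.Dict String Int) (i : String) :
    (K.foldl (aMailStep rc tmp k) res).getD i 0
      = res.getD i 0
        + ((K.filter (fun key => decide (k ≤ rc.getD key 0))).map
            (fun key => ((tmp.getD key []).count i : Int))).sum := by
  induction K generalizing res with
  | nil => simp
  | cons key K ih =>
    simp only [List.foldl_cons, List.filter_cons]
    by_cases hc : k ≤ rc.getD key 0
    · rw [show aMailStep rc tmp k res key
          = (tmp.getD key []).foldl (fun res a => res.modify a 0 (· + 1)) res from by
        simp [aMailStep, hc]]
      rw [ih, PySem.Dict.getD_foldl_modify_add_one]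
      simp only [hc, decide_true, if_true, List.map_cons, List.sum_cons]
      ring
    · rw [show aMailStep rc tmp k res key = res from by simp [aMailStep, hc]]
      rw [ih]
      simp [hc]

theorem delta_sum (M : List String) (hM : M.Nodup) (x : String) (c : Prop) [Decidable c] :
    (M.map (fun key => if x = key ∧ c then (1 : Int) else 0)).sum
      = if x ∈ M ∧ c then 1 else 0 := by
  induction M with
  | nil => simp
  | cons m M ih =>
    have hM' : M.Nodup := (List.nodup_cons.mp hM).2
    simp only [List.map_cons, List.sum_cons, ih hM']
    by_cases hx : x = m
    · subst hx
      have hxm : x ∉ M := (List.nodup_cons.mp hM).1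
      by_cases hc : c <;> simp [hc, hxm]
    · simp only [List.mem_cons]
      by_cases hc : c <;> by_cases hm : x ∈ M <;> simp [hc, hm, hx]

-- double counting: summing per banned key the reporters equals counting per reporter the banned
theorem cross_count (M : List String) (hM : M.Nodup) (i : String) (P : List (String × String)) :
    (M.map (fun key => ((List.count i ((P.filter (fun p => p.2 == key)).map (·.1))) : Int))).sum
      = (P.countP (fun p => p.1 == i && decide (p.2 ∈ M)) : Int) := by
  induction P with
  | nil => simp
  | cons q P ih =>
    have hstep : ∀ key : String,
        ((List.count i (((q :: P).filter (fun p => p.2 == key)).map (·.1))) : Int)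
          = ((List.count i ((P.filter (fun p => p.2 == key)).map (·.1))) : Int)
            + (if q.2 = key ∧ q.1 = i then (1 : Int) else 0) := by
      intro key
      by_cases h2 : q.2 = key
      · simp only [List.filter_cons, h2, beq_self_eq_true, if_true, List.map_cons,
          List.count_cons]
        by_cases h1 : q.1 = i <;> simp [h1]
      · simp [h2]
    rw [List.map_congr_left (fun key _ => hstep key), PySem.List.sum_map_add_int, ih,
      delta_sum M hM q.2 (q.1 = i), List.countP_cons]
    by_cases h1 : q.1 = i <;> by_cases h2 : q.2 ∈ M <;> simp [h1, h2]

-- the count dict keyed by the pair's second component, read back at one id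
theorem cnt_getD (l : List (String × String)) (d : PySem.Dict String Int) (x : String) :
    (l.foldl (fun d p => d.modify p.2 0 (· + 1)) d).getD x 0
      = d.getD x 0 + (l.countP (fun p => p.2 == x) : Int) := by
  induction l generalizing d with
  | nil => simp
  | cons q l ih =>
    simp only [List.foldl_cons, List.countP_cons, ih, PySem.Dict.getD_modify]
    by_cases hx : x = q.2
    · simp [hx]
      ring
    · have hbx : (q.2 == x) = false := by
        rw [beq_eq_false_iff_ne]; exact fun h => hx h.symm
      simp [hx, hbx]

-- A's tmp is grouped by the reported user (the pair's second component): getD after the loop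
theorem tmp_getD (l : List (String × String)) (d : PySem.Dict String (List String)) (c : String) :
    (l.foldl (fun d p => d.modify p.2 [] (· ++ [p.1])) d).getD c []
      = d.getD c [] ++ (l.filter (fun p => p.2 == c)).map (·.1) := by
  induction l generalizing d with
  | nil => simp
  | cons q l ih =>
    simp only [List.foldl_cons, List.filter_cons, ih]
    rw [PySem.Dict.getD_modify]
    by_cases hc : c = q.2
    · simp [hc]
    · have hbc : (q.2 == c) = false := by
        rw [beq_eq_false_iff_ne]; exact fun h => hc h.symm
      simp [hc, hbc]

-- ===== VERDICT (by name: the statement is the Claim_ definition above) =====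
theorem solution_spec : Claim_equal_solution := by
  intro id_list report k _ hpre
  have hg : ∀ r ∈ report, ∃ a b, PySem.Str.split? r " " = some [a, b] := by
    intro r hr
    have h := hpre r hr
    unfold goodReport at h
    split at h
    · next a b heq => exact ⟨a, b, heq⟩
    · simp at h
  have hinv0 : ∀ a b, b ∈ (id_list.foldl (fun d i => d.insert i PySem.Set.empty) PySem.Dict.empty).getD a PySem.Set.empty
      ↔ (a, b) ∈ (PySem.Set.empty : PySem.Set (String × String)) := by
    intro a b
    rw [getD_foldl_insert_const id_list PySem.Set.empty PySem.Dict.empty (fun x => by simp [pysem]) a]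
    simp [PySem.Set.empty]
  obtain ⟨hcnt, htmp⟩ := afold report hg PySem.Set.empty
      (id_list.foldl (fun d i => d.insert i (0 : Int)) PySem.Dict.empty)
      (id_list.foldl (fun d i => d.insert i PySem.Set.empty) PySem.Dict.empty)
      (id_list.foldl (fun d i => d.insert i ([] : List String)) PySem.Dict.empty)
      hinv0
  have hpairs : PySem.Set.ofList (report.map parsePair)
      = sieve PySem.Set.empty (report.map parsePair) := by
    rw [PySem.Set.ofList_eq_foldl, foldl_add_eq_sieve]
    simp [PySem.Set.empty]
  -- the second component of every sieved pair is in id_list (its report was good)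
  have hmem2 : ∀ p ∈ sieve PySem.Set.empty (report.map parsePair), p.2 ∈ id_list := by
    intro p hp
    obtain ⟨r, hr, hpr⟩ := List.mem_map.mp (mem_sieve _ _ _ hp)
    obtain ⟨a, b, hab⟩ := hg r hr
    have h := hpre r hr
    unfold goodReport at h
    rw [hab] at h
    rw [show parsePair r = (a, b) from by simp [parsePair, hab]] at hpr
    subst hpr
    simp [List.contains_eq_mem] at h
    exact h.2
  unfold Spec_solution solution solution_alt
  simp only [foldl_aInitStep, hpairs, hcnt, htmp,
    PySem.List.foldl_append_singleton_eq_map, List.nil_append]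
  refine List.map_congr_left (fun i _ => ?_)
  -- abbreviations
  set P := sieve PySem.Set.empty (report.map parsePair) with hP
  set rc := P.foldl (fun (d : PySem.Dict String Int) (p : String × String) => d.modify p.2 0 (· + 1))
      (id_list.foldl (fun (d : PySem.Dict String Int) (i : String) => d.insert i (0 : Int)) PySem.Dict.empty) with hrc
  -- rc.getD x 0 counts the sieved pairs whose second component is x
  have hrcgetD : ∀ x, rc.getD x 0 = (P.countP (fun p => p.2 == x) : Int) := by
    intro x
    rw [hrc, cnt_getD,
      getD_foldl_insert_const id_list (0 : Int) PySem.Dict.empty (fun x => by simp [pysem]) x,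
      zero_add]
  -- the key set of rc contains id_list
  have hkeys : ∀ x ∈ id_list, x ∈ rc.keys := by
    intro x hx
    rw [hrc, PySem.Dict.keys_foldl_modify_key P (fun p : String × String => p.2) 0
      (fun _ _ => (· + 1)), PySem.Set.mem_update]
    left
    rw [PySem.Dict.keys_foldl_insert id_list (fun _ _ => (0 : Int)) PySem.Dict.empty,
      PySem.Set.mem_update]
    right; exact hx
  have hndK : rc.keys.Nodup := by
    rw [hrc]
    exact PySem.Dict.nodup_keys_foldl_modify_key P (fun p => p.2) 0 (fun _ _ => (· + 1)) _
      (PySem.Dict.nodup_keys_foldl_insert id_list (fun _ _ => 0) PySem.Dict.empty (by simp [pysem]))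
  rw [mail_getD]
  rw [getD_foldl_insert_const id_list (0 : Int) PySem.Dict.empty (fun x => by simp [pysem]) i, zero_add]
  rw [List.map_congr_left (fun key _ => by
    rw [tmp_getD,
      getD_foldl_insert_const id_list ([] : List String) PySem.Dict.empty (fun x => by simp [pysem]) key,
      List.nil_append])]
  rw [cross_count _ (hndK.filter _) i]
  -- both sides count pairs with reporter i and a banned reported user; the two ban tests agree on P
  congr 1
  refine List.countP_congr (fun p hp => ?_)
  have h2 := hmem2 p hp
  have hiff : p.2 ∈ rc.keys.filter (fun key => decide (k ≤ rc.getD key 0)) ↔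
      p.2 ∈ PySem.Set.ofList (id_list.filter
        (fun u => decide (k ≤ (P.countP (fun q => q.2 == u) : Int)))) := by
    rw [PySem.Set.mem_ofList, List.mem_filter, List.mem_filter]
    simp only [decide_eq_true_eq, hrcgetD]
    exact ⟨fun ⟨_, hk⟩ => ⟨h2, hk⟩, fun ⟨_, hk⟩ => ⟨hkeys p.2 h2, hk⟩⟩
  simp only [PySem.Set.contains, List.contains_eq_mem, Bool.and_eq_true, decide_eq_true_eq]
  exact and_congr_right (fun _ => hiff)
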